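-- pv_equiv track=rewrite | github.com/plusplusoneplusplus/mcp | utils/chart_extractor/extractor.py | _merge_nearby_text_regions
-- ===== SOURCE A (Python) =====
-- def _merge_nearby_text_regions(regions, distance_threshold=15):
--     """Merge text regions that are close to each other and likely belong together.
--
--     Args:
--         regions: List of text regions as (x, y, w, h).
--         distance_threshold: Maximum distance between regions to merge.
--
--     Returns:
--         List of merged text regions.
--     """
--     if not regions:
--         return []
--
--     # Convert (x, y, w, h) to (x1, y1, x2, y2) for easier calculations
--     rects = [(x, y, x + w, y + h) for x, y, w, h in regions]
--
--     # Sort by y-coordinate (vertical position) to help with line-based grouping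
--     rects.sort(key=lambda r: r[1])
--
--     merged = []
--     current_group = [rects[0]]
--
--     for i in range(1, len(rects)):
--         current_rect = rects[i]
--         prev_rect = current_group[-1]
--
--         # Check if current rectangle is close to the previous one
--         # (either horizontally aligned or vertically close)
--         horizontally_aligned = abs(current_rect[1] - prev_rect[1]) < distance_threshold
--         vertically_close = abs(current_rect[1] - prev_rect[3]) < distance_threshold
--         horizontally_close = (current_rect[0] - prev_rect[2]) < distance_threshold
--
--         if (horizontally_aligned or vertically_close) and horizontally_close:
--             # Merge with current group
--             current_group.append(current_rect)
--         else:
--             # Finish the current group and start a new one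
--             x1 = min(r[0] for r in current_group)
--             y1 = min(r[1] for r in current_group)
--             x2 = max(r[2] for r in current_group)
--             y2 = max(r[3] for r in current_group)
--             merged.append((x1, y1, x2 - x1, y2 - y1))
--             current_group = [current_rect]
--
--     # Add the last group
--     if current_group:
--         x1 = min(r[0] for r in current_group)
--         y1 = min(r[1] for r in current_group)
--         x2 = max(r[2] for r in current_group)
--         y2 = max(r[3] for r in current_group)
--         merged.append((x1, y1, x2 - x1, y2 - y1))
--
--     return merged
-- ===== SOURCE B (Python) =====
-- def _merge_nearby_text_regions(regions, distance_threshold=15):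
--     """Merge nearby text regions.
--
--     Key observation: in the greedy scan, the rect the proximity test is made
--     against is always simply the PREVIOUS rect in y-sorted order, so no group
--     list is ever needed.  B therefore walks adjacent pairs (zip with the
--     shifted list) and maintains only a running bounding box (four scalars),
--     updated in O(1); a box is emitted whenever the adjacent pair is not close.
--     """
--     if not regions:
--         return []
--
--     rects = sorted(((x, y, x + w, y + h) for x, y, w, h in regions),
--                    key=lambda r: r[1])
--
--     out = []
--     x1, y1, x2, y2 = rects[0]
--     for prev, (a, b, c, d) in zip(rects, rects[1:]):
--         if ((abs(b - prev[1]) < distance_threshold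
--              or abs(b - prev[3]) < distance_threshold)
--                 and a - prev[2] < distance_threshold):
--             # extend the running bounding box
--             x1 = min(x1, a)
--             y1 = min(y1, b)
--             x2 = max(x2, c)
--             y2 = max(y2, d)
--         else:
--             out.append((x1, y1, x2 - x1, y2 - y1))
--             x1, y1, x2, y2 = a, b, c, d
--     out.append((x1, y1, x2 - x1, y2 - y1))
--     return out
-- ===== Notes on version B (the rewrite author's own statement) =====
-- stated objective: simpler
-- what changed: B exploits that the greedy scan's comparison rect is always just the previous rect in y-sorted order, so the current_group list disappears entirely: it walks adjacent pairs via zip(rects, rects[1:]) keeping only a running bounding box in four scalars updated in O(1), instead of A's stateful group list that is re-scanned by four min/max generator passes at every flush.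
import Mathlib
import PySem

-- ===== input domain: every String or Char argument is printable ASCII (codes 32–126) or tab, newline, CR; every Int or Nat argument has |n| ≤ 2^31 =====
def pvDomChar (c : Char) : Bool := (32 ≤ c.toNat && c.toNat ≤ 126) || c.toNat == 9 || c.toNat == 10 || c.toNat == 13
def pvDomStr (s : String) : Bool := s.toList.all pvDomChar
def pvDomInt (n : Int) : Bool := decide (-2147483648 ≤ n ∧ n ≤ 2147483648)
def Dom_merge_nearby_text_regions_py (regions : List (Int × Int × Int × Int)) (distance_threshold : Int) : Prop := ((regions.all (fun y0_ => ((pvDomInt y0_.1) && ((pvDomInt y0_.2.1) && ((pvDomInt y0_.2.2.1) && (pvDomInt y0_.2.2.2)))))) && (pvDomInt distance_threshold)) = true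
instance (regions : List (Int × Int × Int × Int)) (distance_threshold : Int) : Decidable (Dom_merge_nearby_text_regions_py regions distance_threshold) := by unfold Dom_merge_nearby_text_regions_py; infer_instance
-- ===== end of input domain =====

-- B drops A's current_group list: the comparison rect is always the previous rect in
-- y-sorted order, so B walks adjacent pairs keeping only a running bounding box
-- (objective: simpler; same asymptotic cost).

-- ===== PORT A =====

-- A's inline group-closing: four separate min/max scans over the group
def pvBoxA (g : List (Int × Int × Int × Int)) : Int × Int × Int × Int :=
  match g with
  | [] => (0, 0, 0, 0)  -- unreachable: the group is never empty
  | r :: t =>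
    let x1 := t.foldl (fun a s => min a s.1) r.1
    let y1 := t.foldl (fun a s => min a s.2.1) r.2.1
    let x2 := t.foldl (fun a s => max a s.2.2.1) r.2.2.1
    let y2 := t.foldl (fun a s => max a s.2.2.2) r.2.2.2
    (x1, y1, x2 - x1, y2 - y1)

-- A's loop body: state is (merged, current_group); prev_rect = current_group[-1]
def pvStepA (dt : Int) (st : List (Int × Int × Int × Int) × List (Int × Int × Int × Int))
    (cur : Int × Int × Int × Int) : List (Int × Int × Int × Int) × List (Int × Int × Int × Int) :=
  let prev := st.2.getLast?.getD (0, 0, 0, 0)  -- getD unreachable: current_group never empty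
  if (|cur.2.1 - prev.2.1| < dt ∨ |cur.2.1 - prev.2.2.2| < dt) ∧ cur.1 - prev.2.2.1 < dt then
    (st.1, st.2 ++ [cur])
  else
    (st.1 ++ [pvBoxA st.2], [cur])

def merge_nearby_text_regions_py (regions : List (Int × Int × Int × Int)) (distance_threshold : Int) : List (Int × Int × Int × Int) :=
  match regions with
  | [] => []
  | _ :: _ =>
    let rects := PySem.List.sorted
      (regions.map (fun q => (q.1, q.2.1, q.1 + q.2.2.1, q.2.1 + q.2.2.2)))
      (fun r => r.2.1) false
    match rects with
    | [] => []  -- unreachable: rects is a permutation of the nonempty regions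
    | r0 :: rest =>
      let fin := rest.foldl (pvStepA distance_threshold) ([], [r0])
      if fin.2 = [] then fin.1 else fin.1 ++ [pvBoxA fin.2]  -- "if current_group:"

-- ===== PORT B =====

-- Source B's proximity test on an adjacent pair (prev, cur)
def pvCloseB (dt : Int) (p r : Int × Int × Int × Int) : Bool :=
  decide ((|r.2.1 - p.2.1| < dt ∨ |r.2.1 - p.2.2.2| < dt) ∧ r.1 - p.2.2.1 < dt)

-- Source B's emitted tuple (x1, y1, x2 - x1, y2 - y1) from the running box
def pvMk (q : Int × Int × Int × Int) : Int × Int × Int × Int :=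
  (q.1, q.2.1, q.2.2.1 - q.1, q.2.2.2 - q.2.1)

-- Source B's loop body over one zip pair: state is (out, running box (x1,y1,x2,y2))
def pvStepB (dt : Int) (st : List (Int × Int × Int × Int) × (Int × Int × Int × Int))
    (pr : (Int × Int × Int × Int) × (Int × Int × Int × Int)) :
    List (Int × Int × Int × Int) × (Int × Int × Int × Int) :=
  if pvCloseB dt pr.1 pr.2 then
    (st.1, (min st.2.1 pr.2.1, min st.2.2.1 pr.2.2.1,
            max st.2.2.2.1 pr.2.2.2.1, max st.2.2.2.2 pr.2.2.2.2))
  else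
    (st.1 ++ [pvMk st.2], pr.2)

def merge_nearby_text_regions_py_alt (regions : List (Int × Int × Int × Int)) (distance_threshold : Int) : List (Int × Int × Int × Int) :=
  match regions with
  | [] => []
  | _ :: _ =>
    let rects := PySem.List.sorted
      (regions.map (fun q => (q.1, q.2.1, q.1 + q.2.2.1, q.2.1 + q.2.2.2)))
      (fun r => r.2.1) false
    match rects with
    | [] => []  -- unreachable: rects is a permutation of the nonempty regions
    | r0 :: rest =>
      -- zip(rects, rects[1:]) with the running box seeded by rects[0]
      let fin := ((r0 :: rest).zip rest).foldl (pvStepB distance_threshold) ([], r0)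
      fin.1 ++ [pvMk fin.2]

-- ===== PRECONDITION & SPEC =====
def Spec_merge_nearby_text_regions_py (regions : List (Int × Int × Int × Int)) (distance_threshold : Int) (out : List (Int × Int × Int × Int)) : Prop := out = merge_nearby_text_regions_py_alt regions distance_threshold
instance (regions : List (Int × Int × Int × Int)) (distance_threshold : Int) (out : List (Int × Int × Int × Int)) : Decidable (Spec_merge_nearby_text_regions_py regions distance_threshold out) := by unfold Spec_merge_nearby_text_regions_py; infer_instance

-- ===== CLAIM (what is proved, stated in full; the proofs are below) =====
def Claim_equal_merge_nearby_text_regions_py : Prop := ∀ (regions : List (Int × Int × Int × Int)) (distance_threshold : Int), Dom_merge_nearby_text_regions_py regions distance_threshold → Spec_merge_nearby_text_regions_py regions distance_threshold (merge_nearby_text_regions_py regions distance_threshold)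

-- ===== LEMMAS AND PROOFS =====

-- the quadruple min/max fold over a group, seeded by its first rect (B's running box)
def pvQF (g : List (Int × Int × Int × Int)) : Int × Int × Int × Int :=
  match g with
  | [] => (0, 0, 0, 0)  -- unreachable in the proofs: groups are nonempty
  | s :: u => u.foldl
      (fun (a : Int × Int × Int × Int) r =>
        (min a.1 r.1, min a.2.1 r.2.1, max a.2.2.1 r.2.2.1, max a.2.2.2 r.2.2.2)) s

-- the quadruple fold equals the four separate folds of pvBoxA
theorem pvQF_quad (t : List (Int × Int × Int × Int)) (a b c d : Int) :
    t.foldl (fun (a : Int × Int × Int × Int) r =>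
        (min a.1 r.1, min a.2.1 r.2.1, max a.2.2.1 r.2.2.1, max a.2.2.2 r.2.2.2)) (a, b, c, d)
      = (t.foldl (fun a s => min a s.1) a,
         t.foldl (fun a s => min a s.2.1) b,
         t.foldl (fun a s => max a s.2.2.1) c,
         t.foldl (fun a s => max a s.2.2.2) d) := by
  induction t generalizing a b c d with
  | nil => rfl
  | cons h t ih => simp [List.foldl, ih]

theorem pvBoxA_eq_mk (g : List (Int × Int × Int × Int)) (hg : g ≠ []) :
    pvBoxA g = pvMk (pvQF g) := by
  match g with
  | [] => exact absurd rfl hg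
  | r :: t =>
    rcases r with ⟨a, b, c, d⟩
    simp [pvBoxA, pvQF, pvMk, pvQF_quad]

theorem pvQF_append (g : List (Int × Int × Int × Int)) (hg : g ≠ []) (r : Int × Int × Int × Int) :
    pvQF (g ++ [r]) = (min (pvQF g).1 r.1, min (pvQF g).2.1 r.2.1,
        max (pvQF g).2.2.1 r.2.2.1, max (pvQF g).2.2.2 r.2.2.2) := by
  match g with
  | [] => exact absurd rfl hg
  | s :: u => simp [pvQF, List.foldl_append]

-- loop invariant: A's (merged, current_group) versus B's (out, running box);
-- the group's last element is B's current "prev" and its quad fold is B's running box.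
theorem pv_loop (dt : Int) (t : List (Int × Int × Int × Int)) :
    ∀ (M g : List (Int × Int × Int × Int)) (r0 : Int × Int × Int × Int),
    g ≠ [] → g.getLast? = some r0 →
    (t.foldl (pvStepA dt) (M, g)).2 ≠ [] ∧
    (t.foldl (pvStepA dt) (M, g)).1 ++ [pvBoxA (t.foldl (pvStepA dt) (M, g)).2]
      = (((r0 :: t).zip t).foldl (pvStepB dt) (M, pvQF g)).1
        ++ [pvMk ((((r0 :: t).zip t).foldl (pvStepB dt) (M, pvQF g)).2)] := by
  induction t with
  | nil =>
    intro M g r0 hg _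
    exact ⟨hg, by simp [List.foldl, pvBoxA_eq_mk g hg]⟩
  | cons r t ih =>
    intro M g r0 hg hlast
    have hgd : g.getLast?.getD (0, 0, 0, 0) = r0 := by rw [hlast]; rfl
    have hz : ((r0 :: r :: t).zip (r :: t)) = (r0, r) :: ((r :: t).zip t) := by
      simp [List.zip]
    rw [hz]
    simp only [List.foldl]
    by_cases hc : (|r.2.1 - r0.2.1| < dt ∨ |r.2.1 - r0.2.2.2| < dt) ∧ r.1 - r0.2.2.1 < dt
    · have hA : pvStepA dt (M, g) r = (M, g ++ [r]) := by
        simp only [pvStepA, hgd]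
        rw [if_pos hc]
      have hB : pvStepB dt (M, pvQF g) (r0, r) = (M, pvQF (g ++ [r])) := by
        simp only [pvStepB, pvCloseB]
        rw [if_pos (by simpa using hc), pvQF_append g hg r]
      rw [hA, hB]
      exact ih M (g ++ [r]) r (by simp) (by simp)
    · have hA : pvStepA dt (M, g) r = (M ++ [pvBoxA g], [r]) := by
        simp only [pvStepA, hgd]
        rw [if_neg hc]
      have hB : pvStepB dt (M, pvQF g) (r0, r) = (M ++ [pvMk (pvQF g)], r) := by
        simp only [pvStepB, pvCloseB]
        rw [if_neg (by simpa using hc)]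
      rw [hA, hB, pvBoxA_eq_mk g hg]
      have : pvQF [r] = r := by simp [pvQF]
      rw [← this]
      exact ih (M ++ [pvMk (pvQF g)]) [r] r (by simp) (by simp)

-- ===== VERDICT (by name: the statement is the Claim_ definition above) =====
theorem merge_nearby_text_regions_py_spec : Claim_equal_merge_nearby_text_regions_py := by
  intro regions dt _
  unfold Spec_merge_nearby_text_regions_py
  cases regions with
  | nil => rfl
  | cons q qs =>
    simp only [merge_nearby_text_regions_py, merge_nearby_text_regions_py_alt]
    cases hr : PySem.List.sorted
        (((q :: qs) : List (Int × Int × Int × Int)).map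
          (fun q => (q.1, q.2.1, q.1 + q.2.2.1, q.2.1 + q.2.2.2)))
        (fun r => r.2.1) false with
    | nil => rfl
    | cons r0 rest =>
      simp only
      have h := pv_loop dt rest [] [r0] r0 (by simp) (by simp)
      have hq : pvQF [r0] = r0 := by simp [pvQF]
      rw [hq] at h
      rw [if_neg h.1, h.2]
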